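-- pv_equiv track=rewrite | github.com/MinerOfSouls/Mowint | lab10/ocr.py | find_blank_lines
-- ===== SOURCE A (Python) =====
-- def find_blank_lines(projection):
--     lines = []
--     top = 0
--     for i in range(1, len(projection)):
--         if projection[i-1] == 0 and projection[i]>0:
--             top = i-1
--         elif projection[i-1] > 0 and projection[i] == 0:
--             lines.append((top, i))
--     return lines
-- ===== SOURCE B (Python) =====
-- def find_blank_lines(projection):
--     n = len(projection)
--     starts = [i - 1 for i in range(1, n) if projection[i - 1] == 0 and projection[i] > 0]
--     ends = [i for i in range(1, n) if projection[i - 1] > 0 and projection[i] == 0]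
--     result = []
--     for e in ends:
--         below = [s for s in starts if s < e]
--         result.append((below[-1] if below else 0, e))
--     return result
-- ===== Notes on version B (the rewrite author's own statement) =====
-- stated objective: alternative
-- what changed: Replaces the single-pass two-variable state machine with a gather-then-pair decomposition: collect all 0->positive start transitions and positive->0 end transitions in two comprehensions, then pair each end with the last start before it (0 if none).
import Mathlib
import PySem

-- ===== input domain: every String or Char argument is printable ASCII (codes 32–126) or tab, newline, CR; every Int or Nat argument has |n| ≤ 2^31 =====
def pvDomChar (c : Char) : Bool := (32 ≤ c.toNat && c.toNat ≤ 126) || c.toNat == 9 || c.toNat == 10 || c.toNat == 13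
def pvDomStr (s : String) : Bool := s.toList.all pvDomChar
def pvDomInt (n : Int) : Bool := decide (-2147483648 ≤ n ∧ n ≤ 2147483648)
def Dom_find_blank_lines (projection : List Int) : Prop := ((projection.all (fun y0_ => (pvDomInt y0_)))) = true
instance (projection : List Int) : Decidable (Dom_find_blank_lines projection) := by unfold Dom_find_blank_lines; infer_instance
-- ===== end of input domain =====

-- B replaces A's one-pass state machine by a gather-then-pair decomposition (collect start/end
-- transitions, pair each end with the last start before it); same cost class, no speed claim.

-- ===== PORT A =====
-- shared accessor: projection[i]; every index produced below lies in range(0, len), so the default 0 is never used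
def pvG (p : List Int) (i : Int) : Int := PySem.List.pyGetD p i 0

-- one loop iteration of A: state = (lines, top)
def pvStepA (p : List Int) (st : List (Int × Int) × Int) (i : Int) : List (Int × Int) × Int :=
  if pvG p (i - 1) = 0 ∧ 0 < pvG p i then (st.1, i - 1)
  else if 0 < pvG p (i - 1) ∧ pvG p i = 0 then (st.1 ++ [(st.2, i)], st.2)
  else st

def find_blank_lines (projection : List Int) : List (Int × Int) :=
  ((PySem.List.pyRange 1 (PySem.List.len projection) 1).foldl (pvStepA projection) ([], 0)).1

-- ===== PORT B =====
-- the two comprehensions of Source B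
def pvStarts (p : List Int) (idx : List Int) : List Int :=
  (idx.filter (fun i => decide (pvG p (i - 1) = 0 ∧ 0 < pvG p i))).map (· - 1)

def pvEnds (p : List Int) (idx : List Int) : List Int :=
  idx.filter (fun i => decide (0 < pvG p (i - 1) ∧ pvG p i = 0))

-- Source B's loop body: pair an end with the last earlier start (0 if none)
def pvPair (S : List Int) (e : Int) : Int × Int :=
  (((S.filter (fun s => decide (s < e))).getLast?).getD 0, e)

def find_blank_lines_alt (projection : List Int) : List (Int × Int) :=
  let idx := PySem.List.pyRange 1 (PySem.List.len projection) 1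
  (pvEnds projection idx).map (pvPair (pvStarts projection idx))

-- ===== PRECONDITION & SPEC =====
def Spec_find_blank_lines (projection : List Int) (out : List (Int × Int)) : Prop := out = find_blank_lines_alt projection
instance (projection : List Int) (out : List (Int × Int)) : Decidable (Spec_find_blank_lines projection out) := by unfold Spec_find_blank_lines; infer_instance

-- ===== CLAIM (what is proved, stated in full; the proofs are below) =====
def Claim_equal_find_blank_lines : Prop := ∀ (projection : List Int), Dom_find_blank_lines projection → Spec_find_blank_lines projection (find_blank_lines projection)

-- ===== LEMMAS AND PROOFS =====

lemma pv_mem_ends {p : List Int} {b e : Int} (h : e ∈ pvEnds p (PySem.List.pyRange 1 b 1)) : e < b := by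
  have := (List.mem_filter.mp h).1
  exact (PySem.List.mem_pyRange_one.mp this).2

lemma pv_mem_starts {p : List Int} {b s : Int} (h : s ∈ pvStarts p (PySem.List.pyRange 1 b 1)) : s < b - 1 := by
  rcases List.mem_map.mp h with ⟨j, hj, rfl⟩
  have := (List.mem_filter.mp hj).1
  have := (PySem.List.mem_pyRange_one.mp this).2
  omega

-- loop invariant: after processing range(1, 1+k), A's state equals B's data on that prefix
lemma pv_inv (p : List Int) (k : Nat) :
    (PySem.List.pyRange 1 (1 + (k : Int)) 1).foldl (pvStepA p) ([], 0) =
      ((pvEnds p (PySem.List.pyRange 1 (1 + (k : Int)) 1)).map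
          (pvPair (pvStarts p (PySem.List.pyRange 1 (1 + (k : Int)) 1))),
        ((pvStarts p (PySem.List.pyRange 1 (1 + (k : Int)) 1)).getLast?).getD 0) := by
  induction k with
  | zero =>
      simp [PySem.List.pyRange_one_eq_nil (by omega : (1:Int) ≤ 1), pvEnds, pvStarts]
  | succ k ih =>
      have hb : (1 : Int) + ((k + 1 : Nat) : Int) = (1 + (k : Int)) + 1 := by push_cast; ring
      rw [hb, PySem.List.pyRange_one_succ_right (by omega : (1:Int) ≤ 1 + (k:Int))]
      set i : Int := 1 + (k : Int) with hi
      rw [List.foldl_append, ih]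
      by_cases hs : pvG p (i - 1) = 0 ∧ 0 < pvG p i
      · have he : ¬ (0 < pvG p (i - 1) ∧ pvG p i = 0) := fun h => absurd hs.1 (by omega)
        have hS : pvStarts p (PySem.List.pyRange 1 i 1 ++ [i]) =
            pvStarts p (PySem.List.pyRange 1 i 1) ++ [i - 1] := by
          simp [pvStarts, List.filter_append, hs.1, hs.2]
        have hE : pvEnds p (PySem.List.pyRange 1 i 1 ++ [i]) =
            pvEnds p (PySem.List.pyRange 1 i 1) := by
          simp [pvEnds, List.filter_append, he]
        rw [hS, hE]
        simp only [List.foldl_cons, List.foldl_nil, pvStepA, if_pos hs, Prod.mk.injEq]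
        refine ⟨List.map_congr_left (fun e heE => ?_), by simp⟩
        have helt : e < i := pv_mem_ends heE
        simp only [pvPair, List.filter_append, List.filter_cons, List.filter_nil,
          decide_eq_true_eq]
        rw [if_neg (by omega : ¬ (i - 1 < e))]
        simp
      · by_cases he : 0 < pvG p (i - 1) ∧ pvG p i = 0
        · have hS : pvStarts p (PySem.List.pyRange 1 i 1 ++ [i]) =
              pvStarts p (PySem.List.pyRange 1 i 1) := by
            simp [pvStarts, List.filter_append, hs]
          have hE : pvEnds p (PySem.List.pyRange 1 i 1 ++ [i]) =
              pvEnds p (PySem.List.pyRange 1 i 1) ++ [i] := by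
            simp [pvEnds, List.filter_append, he.1, he.2]
          rw [hS, hE]
          simp only [List.foldl_cons, List.foldl_nil, pvStepA, if_neg hs, if_pos he,
            List.map_append, List.map_cons, List.map_nil, Prod.mk.injEq]
          refine ⟨?_, trivial⟩
          have hall : (pvStarts p (PySem.List.pyRange 1 i 1)).filter
              (fun s => decide (s < i)) = pvStarts p (PySem.List.pyRange 1 i 1) :=
            List.filter_eq_self.mpr (fun s hs' => by
              have := pv_mem_starts (b := i) hs'; simp; omega)
          simp only [pvPair, hall]
        · have hS : pvStarts p (PySem.List.pyRange 1 i 1 ++ [i]) =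
              pvStarts p (PySem.List.pyRange 1 i 1) := by
            simp [pvStarts, List.filter_append, hs]
          have hE : pvEnds p (PySem.List.pyRange 1 i 1 ++ [i]) =
              pvEnds p (PySem.List.pyRange 1 i 1) := by
            simp [pvEnds, List.filter_append, he]
          rw [hS, hE]
          simp only [List.foldl_cons, List.foldl_nil, pvStepA, if_neg hs, if_neg he]

-- ===== VERDICT (by name: the statement is the Claim_ definition above) =====
theorem find_blank_lines_spec : Claim_equal_find_blank_lines := by
  intro p _
  unfold Spec_find_blank_lines find_blank_lines find_blank_lines_alt
  cases hn : p.length with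
  | zero =>
      simp [PySem.List.len_eq, hn, PySem.List.pyRange_one_eq_nil (by omega : (0:Int) ≤ 1),
        pvEnds, pvStarts]
  | succ k =>
      have hcast : (PySem.List.len p : Int) = 1 + (k : Int) := by
        simp [PySem.List.len_eq, hn]; omega
      rw [hcast]
      exact congrArg Prod.fst (pv_inv p k) |>.symm ▸ rfl
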